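-- pv_equiv track=rewrite | github.com/jammer-droid/btwin | packages/btwin-core/src/btwin_core/validation_snapshot.py | _relevant_case_progression
-- ===== SOURCE A (Python) =====
-- def _case_verdict(value: str) -> str:
--     normalized = value.strip().lower()
--     if not normalized:
--         return "SKIP"
--     if normalized.startswith("ready") or normalized.startswith("ok") or normalized.startswith("pass"):
--         return "PASS"
--     if normalized.startswith("fail"):
--         return "FAIL"
--     if (
--         normalized.startswith("not triggered")
--         or normalized.startswith("not evaluated")
--         or normalized.startswith("not applicable")
--     ):
--         return "SKIP"
--     return "WARN"
--
-- def _case_label(raw_name: str) -> str: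
--     label = raw_name.strip().replace("_", " ")
--     if not label:
--         return "-"
--     return label[0].upper() + label[1:].lower()
--
-- def _relevant_case_progression(validation_cases: list[str]) -> str:
--     active_items: list[str] = []
--     pass_items: list[str] = []
--     fallback: str | None = None
--     for case_line in validation_cases:
--         if ":" not in case_line:
--             continue
--         raw_name, raw_value = case_line.split(":", 1)
--         verdict = _case_verdict(raw_value)
--         label = f"{_case_label(raw_name)} [{verdict}]"
--         if fallback is None:
--             fallback = label
--         if verdict in {"WARN", "FAIL"}:
--             active_items.append(label)
--         elif verdict == "PASS":
--             pass_items.append(label)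
--     if active_items:
--         return " - ".join(active_items)
--     if pass_items:
--         return " - ".join(pass_items)
--     return fallback or "-"
-- ===== SOURCE B (Python) =====
-- def _case_verdict(value: str) -> str:
--     normalized = value.strip().lower()
--     if not normalized:
--         return "SKIP"
--     if normalized.startswith("ready") or normalized.startswith("ok") or normalized.startswith("pass"):
--         return "PASS"
--     if normalized.startswith("fail"):
--         return "FAIL"
--     if (
--         normalized.startswith("not triggered")
--         or normalized.startswith("not evaluated")
--         or normalized.startswith("not applicable")
--     ):
--         return "SKIP"
--     return "WARN"
--
-- def _case_label(raw_name: str) -> str: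
--     label = raw_name.strip().replace("_", " ")
--     if not label:
--         return "-"
--     return label[0].upper() + label[1:].lower()
--
-- _PRIORITY = {"FAIL": 2, "WARN": 2, "PASS": 1, "SKIP": 0}
--
-- def _relevant_case_progression(validation_cases: list[str]) -> str:
--     # online tournament: keep the best verdict tier seen so far and the joined
--     # labels of that tier; a higher tier resets the running string, an equal
--     # tier (above SKIP) appends, a lower tier is ignored.
--     best = -1
--     joined = "-"
--     for case_line in validation_cases:
--         if ":" not in case_line:
--             continue
--         raw_name, raw_value = case_line.split(":", 1)
--         verdict = _case_verdict(raw_value)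
--         label = f"{_case_label(raw_name)} [{verdict}]"
--         priority = _PRIORITY[verdict]
--         if priority > best:
--             best = priority
--             joined = label
--         elif priority == best and best > 0:
--             joined = joined + " - " + label
--     return joined
-- ===== Notes on version B (the rewrite author's own statement) =====
-- stated objective: alternative
-- what changed: A buckets labels into three lists plus a fallback and picks a bucket after the loop; B keeps no lists at all: a single online tournament over (best verdict tier, running joined string) where a higher tier resets the string, an equal tier above SKIP appends, and the answer is the running string itself.
import Mathlib
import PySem

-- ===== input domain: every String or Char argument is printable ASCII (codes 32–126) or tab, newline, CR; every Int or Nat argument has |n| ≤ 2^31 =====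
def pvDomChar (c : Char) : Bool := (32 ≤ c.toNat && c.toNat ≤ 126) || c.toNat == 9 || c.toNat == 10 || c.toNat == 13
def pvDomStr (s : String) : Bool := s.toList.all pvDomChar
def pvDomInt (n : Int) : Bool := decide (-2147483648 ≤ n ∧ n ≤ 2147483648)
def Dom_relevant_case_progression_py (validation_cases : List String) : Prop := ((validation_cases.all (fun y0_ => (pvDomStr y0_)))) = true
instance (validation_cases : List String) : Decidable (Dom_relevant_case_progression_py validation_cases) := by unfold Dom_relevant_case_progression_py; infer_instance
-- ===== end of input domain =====

-- B replaces A's three bucket lists plus fallback by an online tournament over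
-- (best verdict tier, running joined string); return value only, same cost ("alternative").

-- ===== PORT A =====
-- shared helper: _case_verdict (value.strip().lower(); exact on the ASCII domain)
def caseVerdict (value : String) : String :=
  let normalized := PySem.Str.lower (PySem.Str.strip value)
  if normalized == "" then "SKIP"
  else if PySem.Str.startswith normalized "ready" || PySem.Str.startswith normalized "ok" || PySem.Str.startswith normalized "pass" then "PASS"
  else if PySem.Str.startswith normalized "fail" then "FAIL"
  else if PySem.Str.startswith normalized "not triggered" || PySem.Str.startswith normalized "not evaluated" || PySem.Str.startswith normalized "not applicable" then "SKIP"
  else "WARN"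

-- shared helper: _case_label (label[0].upper() + label[1:].lower(); exact on ASCII)
def caseLabel (raw_name : String) : String :=
  let label := PySem.Str.replace (PySem.Str.strip raw_name) "_" " "
  match label.toList with
  | [] => "-"
  | c :: rest => String.ofList (PySem.Chars.upperChar c :: PySem.Chars.lower rest)

-- shared helper: the f-string f"{_case_label(raw_name)} [{verdict}]" (concatenation via
-- PySem.Str.join; Lean's own String.append is kernel-opaque)
def mkLabel (raw_name verdict : String) : String :=
  PySem.Str.join "" [caseLabel raw_name, " [", verdict, "]"]

-- A's loop body over (active_items, pass_items, fallback); the `| _` arm of the split match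
-- is unreachable (":" is in the line, so the split has ≥ 2 pieces) and keeps the state
def stepA (st : List String × List String × Option String) (line : String) :
    List String × List String × Option String :=
  if PySem.Str.isIn ":" line then
    match PySem.Str.splitMax? line ":" 1 with
    | some (rawName :: rawValue :: _) =>
        let verdict := caseVerdict rawValue
        let label := mkLabel rawName verdict
        let fb := match st.2.2 with | none => some label | some f => some f
        if verdict == "WARN" || verdict == "FAIL" then (st.1 ++ [label], st.2.1, fb)
        else if verdict == "PASS" then (st.1, st.2.1 ++ [label], fb)
        else (st.1, st.2.1, fb)
    | _ => st
  else st

def relevant_case_progression_py (validation_cases : List String) : String :=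
  let st := validation_cases.foldl stepA ([], [], none)
  if st.1.isEmpty then
    if st.2.1.isEmpty then
      match st.2.2 with
      | none => "-"
      | some f => if f == "" then "-" else f   -- `fallback or "-"`
    else PySem.Str.join " - " st.2.1
  else PySem.Str.join " - " st.1

-- ===== PORT B =====
-- the module-level dict _PRIORITY = {"FAIL": 2, "WARN": 2, "PASS": 1, "SKIP": 0}
def PRIORITY : PySem.Dict String Int :=
  PySem.Dict.ofList [("FAIL", 2), ("WARN", 2), ("PASS", 1), ("SKIP", 0)]

-- B's loop body over (best, joined); `_PRIORITY[verdict]` never raises since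
-- caseVerdict only returns the four keys, so the lookup is ported with getD;
-- `joined + " - " + label` is ported via PySem.Str.join (String.append is kernel-opaque)
def stepB (st : Int × String) (line : String) : Int × String :=
  if PySem.Str.isIn ":" line then
    match PySem.Str.splitMax? line ":" 1 with
    | some (rawName :: rawValue :: _) =>
        let verdict := caseVerdict rawValue
        let label := mkLabel rawName verdict
        let priority := PRIORITY.getD verdict 0
        if priority > st.1 then (priority, label)
        else if priority == st.1 && decide (st.1 > 0) then (st.1, PySem.Str.join "" [st.2, " - ", label])
        else st
    | _ => st
  else st

def relevant_case_progression_py_alt (validation_cases : List String) : String :=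
  (validation_cases.foldl stepB (-1, "-")).2

-- ===== PRECONDITION & SPEC =====
def Spec_relevant_case_progression_py (validation_cases : List String) (out : String) : Prop := out = relevant_case_progression_py_alt validation_cases
instance (validation_cases : List String) (out : String) : Decidable (Spec_relevant_case_progression_py validation_cases out) := by unfold Spec_relevant_case_progression_py; infer_instance

-- ===== CLAIM (what is proved, stated in full; the proofs are below) =====
def Claim_equal_relevant_case_progression_py : Prop := ∀ (validation_cases : List String), Dom_relevant_case_progression_py validation_cases → Spec_relevant_case_progression_py validation_cases (relevant_case_progression_py validation_cases)

-- ===== LEMMAS AND PROOFS =====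

-- A's post-loop selection, as a function of the final state
def finishA (st : List String × List String × Option String) : String :=
  if st.1.isEmpty then
    if st.2.1.isEmpty then
      match st.2.2 with
      | none => "-"
      | some f => if f == "" then "-" else f
    else PySem.Str.join " - " st.2.1
  else PySem.Str.join " - " st.1

-- the relation between A's bucket state and B's tournament state
def InvAB (a p : List String) (f : Option String) (best : Int) (joined : String) : Prop :=
  (best = -1 ∧ a = [] ∧ p = [] ∧ f = none ∧ joined = "-") ∨
  (best = 0 ∧ a = [] ∧ p = [] ∧ f = some joined ∧ joined ≠ "") ∨
  (best = 1 ∧ a = [] ∧ p ≠ [] ∧ joined = PySem.Str.join " - " p) ∨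
  (best = 2 ∧ a ≠ [] ∧ joined = PySem.Str.join " - " a)

lemma chars_join_snoc (sep : List Char) (l : List (List Char)) (x : List Char) (h : l ≠ []) :
    PySem.Chars.join sep (l ++ [x]) = PySem.Chars.join sep l ++ sep ++ x := by
  induction l with
  | nil => simp at h
  | cons y ys ih =>
    cases ys with
    | nil => simp [PySem.Chars.join_cons_cons, PySem.Chars.join_singleton]
    | cons z zs =>
      simp only [List.cons_append, PySem.Chars.join_cons_cons]
      rw [← List.cons_append, ih (by simp)]
      simp [List.append_assoc]

lemma str_join_singleton (sep x : String) : PySem.Str.join sep [x] = x := by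
  apply String.toList_inj.mp
  simp [PySem.Str.toList_join, PySem.Chars.join_singleton]

lemma str_join_snoc (sep : String) (l : List String) (x : String) (h : l ≠ []) :
    PySem.Str.join sep (l ++ [x]) = PySem.Str.join "" [PySem.Str.join sep l, sep, x] := by
  apply String.toList_inj.mp
  simp only [PySem.Str.toList_join, List.map_append, List.map_cons, List.map_nil]
  rw [chars_join_snoc _ _ _ (by simpa using h)]
  simp [PySem.Chars.join_cons_cons, PySem.Chars.join_singleton]

lemma mkLabel_ne_empty (n v : String) : mkLabel n v ≠ "" := by
  intro h
  have h' := congrArg String.toList h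
  simp [mkLabel, PySem.Str.toList_join, PySem.Chars.join_cons_cons,
    PySem.Chars.join_singleton] at h'

lemma verdict_cases (v : String) :
    caseVerdict v = "SKIP" ∨ caseVerdict v = "PASS" ∨ caseVerdict v = "FAIL" ∨ caseVerdict v = "WARN" := by
  unfold caseVerdict
  dsimp only
  split_ifs <;> simp

lemma stepA_eq (line n v : String) (tail : List String) (a p : List String) (f : Option String)
    (hc : PySem.Str.isIn ":" line = true)
    (hs : PySem.Str.splitMax? line ":" 1 = some (n :: v :: tail)) :
    stepA (a, p, f) line =
      (if caseVerdict v == "WARN" || caseVerdict v == "FAIL" then a ++ [mkLabel n (caseVerdict v)] else a,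
       if caseVerdict v == "PASS" then p ++ [mkLabel n (caseVerdict v)] else p,
       some (f.getD (mkLabel n (caseVerdict v)))) := by
  cases f <;> simp only [stepA, hc, hs] <;> split_ifs <;> simp_all

lemma stepB_eq (line n v : String) (tail : List String) (best : Int) (joined : String)
    (hc : PySem.Str.isIn ":" line = true)
    (hs : PySem.Str.splitMax? line ":" 1 = some (n :: v :: tail)) :
    stepB (best, joined) line =
      (if PRIORITY.getD (caseVerdict v) 0 > best then (PRIORITY.getD (caseVerdict v) 0, mkLabel n (caseVerdict v))
       else if PRIORITY.getD (caseVerdict v) 0 == best && decide (best > 0) then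
         (best, PySem.Str.join "" [joined, " - ", mkLabel n (caseVerdict v)])
       else (best, joined)) := by
  simp [stepB, hs, show PySem.Chars.isIn [':'] line.toList = true by simpa using hc]

lemma main_loop (cases : List String) :
    ∀ (a p : List String) (f : Option String) (best : Int) (joined : String),
      InvAB a p f best joined →
      finishA (cases.foldl stepA (a, p, f)) = (cases.foldl stepB (best, joined)).2 := by
  induction cases with
  | nil =>
    intro a p f best joined hInv
    simp only [List.foldl_nil]
    rcases hInv with ⟨_, ha, hp, hf, hj⟩ | ⟨_, ha, hp, hf, hj⟩ | ⟨_, ha, hp, hj⟩ | ⟨_, ha, hj⟩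
    · subst ha; subst hp; subst hf; subst hj; simp [finishA]
    · subst ha; subst hp; subst hf
      simp [finishA, beq_iff_eq, hj]
    · subst ha; subst hj
      simp [finishA, List.isEmpty_iff, hp]
    · subst hj
      simp [finishA, List.isEmpty_iff, ha]
  | cons line rest ih =>
    intro a p f best joined hInv
    simp only [List.foldl_cons]
    by_cases hc : PySem.Str.isIn ":" line = true
    · rcases hs : PySem.Str.splitMax? line ":" 1 with _ | ⟨_ | ⟨n, _ | ⟨v, tail⟩⟩⟩
      · have hA : stepA (a, p, f) line = (a, p, f) := by simp [stepA, hs]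
        have hB : stepB (best, joined) line = (best, joined) := by simp [stepB, hs]
        rw [hA, hB]; exact ih _ _ _ _ _ hInv
      · have hA : stepA (a, p, f) line = (a, p, f) := by simp [stepA, hs]
        have hB : stepB (best, joined) line = (best, joined) := by simp [stepB, hs]
        rw [hA, hB]; exact ih _ _ _ _ _ hInv
      · have hA : stepA (a, p, f) line = (a, p, f) := by simp [stepA, hs]
        have hB : stepB (best, joined) line = (best, joined) := by simp [stepB, hs]
        rw [hA, hB]; exact ih _ _ _ _ _ hInv
      · rw [stepA_eq line n v tail a p f hc hs, stepB_eq line n v tail best joined hc hs]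
        rcases verdict_cases v with hv | hv | hv | hv <;> rw [hv] <;>
          rcases hInv with ⟨hb, ha, hp, hf, hj⟩ | ⟨hb, ha, hp, hf, hj⟩ | ⟨hb, ha, hp, hj⟩ | ⟨hb, ha, hj⟩ <;>
            subst hb
        -- SKIP
        · subst ha; subst hp; subst hf; subst hj
          norm_num [show PRIORITY.getD "SKIP" 0 = (0 : Int) from rfl]
          exact ih _ _ _ _ _ (Or.inr (Or.inl ⟨rfl, rfl, rfl, rfl, mkLabel_ne_empty n "SKIP"⟩))
        · subst ha; subst hp; subst hf
          norm_num [show PRIORITY.getD "SKIP" 0 = (0 : Int) from rfl]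
          exact ih _ _ _ _ _ (Or.inr (Or.inl ⟨rfl, rfl, rfl, rfl, hj⟩))
        · norm_num [show PRIORITY.getD "SKIP" 0 = (0 : Int) from rfl]
          exact ih _ _ _ _ _ (Or.inr (Or.inr (Or.inl ⟨rfl, ha, hp, hj⟩)))
        · norm_num [show PRIORITY.getD "SKIP" 0 = (0 : Int) from rfl]
          exact ih _ _ _ _ _ (Or.inr (Or.inr (Or.inr ⟨rfl, ha, hj⟩)))
        -- PASS
        · subst ha; subst hp; subst hf; subst hj
          norm_num [show PRIORITY.getD "PASS" 0 = (1 : Int) from rfl]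
          exact ih _ _ _ _ _ (Or.inr (Or.inr (Or.inl ⟨rfl, rfl, by simp, (str_join_singleton _ _).symm⟩)))
        · subst ha; subst hp; subst hf
          norm_num [show PRIORITY.getD "PASS" 0 = (1 : Int) from rfl]
          exact ih _ _ _ _ _ (Or.inr (Or.inr (Or.inl ⟨rfl, rfl, by simp, (str_join_singleton _ _).symm⟩)))
        · subst ha; subst hj
          norm_num [show PRIORITY.getD "PASS" 0 = (1 : Int) from rfl]
          exact ih _ _ _ _ _ (Or.inr (Or.inr (Or.inl ⟨rfl, rfl, by simp, (str_join_snoc _ _ _ hp).symm⟩)))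
        · subst hj
          norm_num [show PRIORITY.getD "PASS" 0 = (1 : Int) from rfl]
          exact ih _ _ _ _ _ (Or.inr (Or.inr (Or.inr ⟨rfl, ha, rfl⟩)))
        -- FAIL
        · subst ha; subst hp; subst hf; subst hj
          norm_num [show PRIORITY.getD "FAIL" 0 = (2 : Int) from rfl]
          exact ih _ _ _ _ _ (Or.inr (Or.inr (Or.inr ⟨rfl, by simp, (str_join_singleton _ _).symm⟩)))
        · subst ha; subst hp; subst hf
          norm_num [show PRIORITY.getD "FAIL" 0 = (2 : Int) from rfl]
          exact ih _ _ _ _ _ (Or.inr (Or.inr (Or.inr ⟨rfl, by simp, (str_join_singleton _ _).symm⟩)))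
        · subst ha; subst hj
          norm_num [show PRIORITY.getD "FAIL" 0 = (2 : Int) from rfl]
          exact ih _ _ _ _ _ (Or.inr (Or.inr (Or.inr ⟨rfl, by simp, (str_join_singleton _ _).symm⟩)))
        · subst hj
          norm_num [show PRIORITY.getD "FAIL" 0 = (2 : Int) from rfl]
          exact ih _ _ _ _ _ (Or.inr (Or.inr (Or.inr ⟨rfl, by simp [ha], (str_join_snoc _ _ _ ha).symm⟩)))
        -- WARN
        · subst ha; subst hp; subst hf; subst hj
          norm_num [show PRIORITY.getD "WARN" 0 = (2 : Int) from rfl]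
          exact ih _ _ _ _ _ (Or.inr (Or.inr (Or.inr ⟨rfl, by simp, (str_join_singleton _ _).symm⟩)))
        · subst ha; subst hp; subst hf
          norm_num [show PRIORITY.getD "WARN" 0 = (2 : Int) from rfl]
          exact ih _ _ _ _ _ (Or.inr (Or.inr (Or.inr ⟨rfl, by simp, (str_join_singleton _ _).symm⟩)))
        · subst ha; subst hj
          norm_num [show PRIORITY.getD "WARN" 0 = (2 : Int) from rfl]
          exact ih _ _ _ _ _ (Or.inr (Or.inr (Or.inr ⟨rfl, by simp, (str_join_singleton _ _).symm⟩)))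
        · subst hj
          norm_num [show PRIORITY.getD "WARN" 0 = (2 : Int) from rfl]
          exact ih _ _ _ _ _ (Or.inr (Or.inr (Or.inr ⟨rfl, by simp [ha], (str_join_snoc _ _ _ ha).symm⟩)))
    · have hc2 : PySem.Chars.isIn [':'] line.toList = false := by simpa using hc
      have hA : stepA (a, p, f) line = (a, p, f) := by simp [stepA, hc2]
      have hB : stepB (best, joined) line = (best, joined) := by simp [stepB, hc2]
      rw [hA, hB]; exact ih _ _ _ _ _ hInv

-- ===== VERDICT (by name: the statement is the Claim_ definition above) =====
theorem relevant_case_progression_py_spec : Claim_equal_relevant_case_progression_py := by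
  intro vc _
  unfold Spec_relevant_case_progression_py relevant_case_progression_py relevant_case_progression_py_alt
  exact main_loop vc [] [] none (-1) "-" (Or.inl ⟨rfl, rfl, rfl, rfl, rfl⟩)
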